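-- pv_equiv track=rewrite | github.com/mortyc126-debug/SHA-256 | exp96_verification.py | star_carry
-- ===== SOURCE A (Python) =====
-- def star_carry(x, a, n=32):
--     """Carry reconstruction from ★-pair.
--     carry[i] = a[i] | (x[i] & carry[i-1])
--     Note: carry[i] is carry OUT of position i = carry INTO position i+1.
--     The carry CONTRIBUTION to sum at position i+1 = carry[i].
--     So actual_carry = the sequential carry chain."""
--     c = 0
--     carry_bits = 0
--     for i in range(n):
--         ai = (a >> i) & 1
--         xi = (x >> i) & 1
--         c = ai | (xi & c)
--         if i > 0:  # carry into position i = carry out of position i-1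
--             carry_bits |= (c << i)
--         # For position 0: carry_in = 0 (no previous), c = a[0] = carry_out[0]
--         if i == 0:
--             carry_bits = 0  # no carry into bit 0
--             # carry out of bit 0 = a[0] | (x[0] & 0) = a[0]
--             c = ai
--     # Recompute properly
--     c = 0
--     carry_bits = 0
--     for i in range(n):
--         ai = (a >> i) & 1
--         xi = (x >> i) & 1
--         c_new = ai | (xi & c)
--         carry_bits |= (c << i)  # carry INTO position i
--         c = c_new
--     return carry_bits
-- ===== SOURCE B (Python) =====
-- def star_carry(x, a, n=32):
--     if n <= 0:
--         return 0
--     mask = (1 << n) - 1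
--     u = (x & mask) | (a & mask)
--     v = a & mask
--     return ((u + v) ^ u ^ v) & mask
-- ===== Notes on version B (the rewrite author's own statement) =====
-- stated objective: faster
-- what changed: Replaces the Python-level loop over all n bit positions (two sequential carry-chain scans) by a single word-level identity: the carry-in bits of the n-bit addition u+v with u=(x|a)&mask, v=a&mask are exactly (u+v)^u^v, so the result is ((u+v)^u^v)&mask computed with O(1) big-int operations.
import Mathlib
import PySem

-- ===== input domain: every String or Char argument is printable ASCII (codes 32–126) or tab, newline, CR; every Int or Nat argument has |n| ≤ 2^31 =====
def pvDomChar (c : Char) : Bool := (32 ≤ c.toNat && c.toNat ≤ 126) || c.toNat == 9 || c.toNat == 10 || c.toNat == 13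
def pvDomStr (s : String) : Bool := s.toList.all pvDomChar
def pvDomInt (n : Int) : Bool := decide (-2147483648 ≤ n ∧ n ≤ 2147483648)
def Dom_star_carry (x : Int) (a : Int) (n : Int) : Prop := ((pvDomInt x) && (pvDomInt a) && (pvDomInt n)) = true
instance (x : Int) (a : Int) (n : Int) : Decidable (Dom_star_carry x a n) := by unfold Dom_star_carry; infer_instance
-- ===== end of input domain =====

-- B replaces A's sequential per-bit carry loop by a single word-level addition
-- ((u+v)^u^v recovers the carry-in bits of u+v), masked to n bits: O(1) big-int ops
-- instead of a Python-level loop of n iterations.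

-- ===== PORT A =====
-- first loop of the Python (its result is discarded: the Python resets c and carry_bits to 0)
def starBody1 (x : Int) (a : Int) (s : Int × Int) (i : Int) : Int × Int :=
  let ai := PySem.Int.band (a >>> i.toNat) 1
  let xi := PySem.Int.band (x >>> i.toNat) 1
  let c := PySem.Int.bor ai (PySem.Int.band xi s.1)
  let carry_bits := if 0 < i then PySem.Int.bor s.2 (c <<< i.toNat) else s.2
  if i = 0 then (ai, 0) else (c, carry_bits)

-- second loop ("Recompute properly")
def starBody2 (x : Int) (a : Int) (s : Int × Int) (i : Int) : Int × Int :=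
  let ai := PySem.Int.band (a >>> i.toNat) 1
  let xi := PySem.Int.band (x >>> i.toNat) 1
  let c_new := PySem.Int.bor ai (PySem.Int.band xi s.1)
  (c_new, PySem.Int.bor s.2 (s.1 <<< i.toNat))

def star_carry (x : Int) (a : Int) (n : Int) : Int :=
  let _ := (PySem.List.pyRange 0 n).foldl (starBody1 x a) (0, 0)
  ((PySem.List.pyRange 0 n).foldl (starBody2 x a) (0, 0)).2

-- ===== PORT B =====
def star_carry_alt (x : Int) (a : Int) (n : Int) : Int :=
  if n ≤ 0 then 0
  else
    let mask := ((1 : Int) <<< n.toNat) - 1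
    let u := PySem.Int.bor (PySem.Int.band x mask) (PySem.Int.band a mask)
    let v := PySem.Int.band a mask
    PySem.Int.band (PySem.Int.bxor (PySem.Int.bxor (u + v) u) v) mask

-- ===== PRECONDITION & SPEC =====
def Spec_star_carry (x : Int) (a : Int) (n : Int) (out : Int) : Prop := out = star_carry_alt x a n
instance (x : Int) (a : Int) (n : Int) (out : Int) : Decidable (Spec_star_carry x a n out) := by unfold Spec_star_carry; infer_instance

-- ===== CLAIM (what is proved, stated in full; the proofs are below) =====
def Claim_equal_star_carry : Prop := ∀ (x : Int) (a : Int) (n : Int), Dom_star_carry x a n → Spec_star_carry x a n (star_carry x a n)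

-- ===== LEMMAS AND PROOFS =====

lemma nat_or_split (i p p' q q' : Nat) (hp : p < 2 ^ i) (hp' : p' < 2 ^ i) :
    (2 ^ i * q + p) ||| (2 ^ i * q' + p') = 2 ^ i * (q ||| q') + (p ||| p') := by
  apply Nat.eq_of_testBit_eq
  intro j
  simp only [Nat.testBit_or, Nat.testBit_two_pow_mul_add _ hp,
    Nat.testBit_two_pow_mul_add _ hp', Nat.testBit_two_pow_mul_add _ (Nat.or_lt_two_pow hp hp')]
  by_cases h : j < i <;> simp [h]

lemma nat_xor_split (i p p' q q' : Nat) (hp : p < 2 ^ i) (hp' : p' < 2 ^ i) :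
    (2 ^ i * q + p) ^^^ (2 ^ i * q' + p') = 2 ^ i * (q ^^^ q') + (p ^^^ p') := by
  apply Nat.eq_of_testBit_eq
  intro j
  simp only [Nat.testBit_xor, Nat.testBit_two_pow_mul_add _ hp,
    Nat.testBit_two_pow_mul_add _ hp', Nat.testBit_two_pow_mul_add _ (Nat.xor_lt_two_pow hp hp')]
  by_cases h : j < i <;> simp [h]

lemma nat_mod_split (i Q p : Nat) (hp : p < 2 ^ i) :
    (2 ^ i * Q + p) % 2 ^ (i + 1) = 2 ^ i * (Q % 2) + p := by
  have hQ : 2 * (Q / 2) + Q % 2 = Q := Nat.div_add_mod Q 2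
  have h1 : 2 ^ i * Q + p = 2 ^ (i + 1) * (Q / 2) + (2 ^ i * (Q % 2) + p) := by
    calc 2 ^ i * Q + p = 2 ^ i * (2 * (Q / 2) + Q % 2) + p := by rw [hQ]
    _ = 2 ^ (i + 1) * (Q / 2) + (2 ^ i * (Q % 2) + p) := by ring
  rw [h1, Nat.mul_add_mod_self_left]
  apply Nat.mod_eq_of_lt
  have : Q % 2 ≤ 1 := by omega
  have : 2 ^ i * (Q % 2) ≤ 2 ^ i * 1 := Nat.mul_le_mul_left _ this
  have : 2 ^ (i + 1) = 2 ^ i * 2 := by ring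
  omega

lemma band_mask (z : Int) (m : Nat) :
    PySem.Int.band z ((2 : Int) ^ m - 1) = z % (2 : Int) ^ m := by
  have hM : (1 : Int) ≤ (2 : Int) ^ m := by exact_mod_cast Nat.one_le_two_pow
  have hMnat : ((2 : Int) ^ m - 1).toNat = 2 ^ m - 1 := by
    have : ((2 : Int) ^ m) = ((2 ^ m : Nat) : Int) := by push_cast; ring
    omega
  unfold PySem.Int.band
  by_cases hz : 0 ≤ z
  · rw [if_pos hz, if_pos (by omega)]
    rw [hMnat, Nat.and_two_pow_sub_one_eq_mod]
    have h2 : z = ((z.toNat : Int)) := by omega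
    rw [h2, Int.natCast_mod]
    simp
  · rw [if_neg hz, if_pos (by omega)]
    rw [hMnat, Nat.and_comm, Nat.and_two_pow_sub_one_eq_mod]
    set t : Nat := (-z - 1).toNat with ht
    have hzt : z = -1 - (t : Int) := by omega
    have hTd : (t : Int) = (2:Int)^m * ((t : Int) / (2:Int)^m) + (t : Int) % (2:Int)^m :=
      by rw [Int.mul_ediv_add_emod]
    have htm : ((t % 2 ^ m : Nat) : Int) = (t : Int) % (2:Int)^m := by
      rw [Int.natCast_mod]; push_cast; ring_nf
    have hlt : (t : Int) % (2:Int)^m < 2 ^ m := Int.emod_lt_of_pos _ (by omega)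
    have hge : (0:Int) ≤ (t : Int) % (2:Int)^m := Int.emod_nonneg _ (by omega)
    have hzeq : z = ((2:Int)^m - 1 - (t:Int) % (2:Int)^m) + (2:Int)^m * (-(1 + (t:Int)/(2:Int)^m)) := by
      rw [hzt]; nlinarith [hTd]
    rw [hzeq, Int.add_mul_emod_self_left, Int.emod_eq_of_lt (by omega) (by omega)]
    omega

lemma bit_read (z : Int) (i m : Nat) (h : i < m) :
    PySem.Int.band (z >>> i) 1 = (((z % (2 : Int) ^ m).toNat / 2 ^ i) % 2 : Nat) := by
  have hM : (1 : Int) ≤ (2 : Int) ^ m := by exact_mod_cast Nat.one_le_two_pow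
  rw [PySem.Int.band_one, PySem.Int.mod_eq_emod_of_pos (by norm_num)]
  rw [Int.shiftRight_eq_div_pow]
  have hw0 : (0:Int) ≤ z % (2:Int)^m := Int.emod_nonneg _ (by omega)
  set w : Int := z % (2:Int)^m with hw
  set q : Int := z / (2:Int)^m with hq
  have hsplit : z = w + (2:Int)^i * ((2:Int)^(m-i) * q) := by
    have h1 : (2:Int)^i * (2:Int)^(m-i) = (2:Int)^m := by
      rw [← pow_add]; congr 1; omega
    have h2 : (2:Int)^m * q + w = z := Int.mul_ediv_add_emod z ((2:Int)^m)
    calc z = 2 ^ m * q + w := h2.symm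
    _ = w + (2:Int)^i * ((2:Int)^(m-i) * q) := by rw [← h1]; ring
  have hstep : z / ((2:Int)^i : Int) = w / (2:Int)^i + (2:Int)^(m-i) * q := by
    conv_lhs => rw [hsplit]
    rw [mul_comm ((2:Int)^i) _, Int.add_mul_ediv_right _ _ (by positivity : ((2:Int)^i) ≠ 0)]
  have hcast : ((2 ^ i : Nat) : Int) = (2:Int)^i := by push_cast; ring
  rw [hcast, hstep]
  have h2dvd : (2:Int)^(m-i) * q = 2 * ((2:Int)^(m-i-1) * q) := by
    have : (2:Int)^(m-i) = 2 * (2:Int)^(m-i-1) := by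
      rw [← pow_succ']; congr 1; omega
    rw [this]; ring
  rw [h2dvd, mul_comm (2:Int) _, mul_comm ((2:Int)^(m-i-1) * q) 2]
  rw [show w / (2:Int)^i + 2 * ((2:Int)^(m-i-1) * q) = w / (2:Int)^i + (2:Int)^(m-i-1) * q * 2 from by ring, Int.add_mul_emod_self_right]
  have hwn : w = ((w.toNat : Nat) : Int) := by omega
  rw [hwn]
  push_cast
  rfl

lemma nat_bit_or (p q i : Nat) : (p ||| q) / 2 ^ i % 2 = (p / 2 ^ i % 2) ||| (q / 2 ^ i % 2) := by
  have h := Nat.testBit_or p q i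
  simp only [Nat.testBit_eq_decide_div_mod_eq] at h
  have h1 : p / 2 ^ i % 2 = 0 ∨ p / 2 ^ i % 2 = 1 := by omega
  have h2 : q / 2 ^ i % 2 = 0 ∨ q / 2 ^ i % 2 = 1 := by omega
  have h0 : (p ||| q) / 2 ^ i % 2 = 0 ∨ (p ||| q) / 2 ^ i % 2 = 1 := by omega
  rcases h1 with h1 | h1 <;> rcases h2 with h2 | h2 <;> rw [h1, h2] <;> simp_all

lemma nat_div_split (m t r : Nat) (hr : r < 2 ^ m) : (2 ^ m * t + r) / 2 ^ (m + 1) = t / 2 := by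
  have h1 : (2:Nat) ^ (m + 1) = 2 ^ m * 2 := by ring
  rw [h1, ← Nat.div_div_eq_div_mul, Nat.mul_add_div (by positivity), Nat.div_eq_of_lt hr]
  simp

lemma carry_inv (x a : Int) (N : Nat) (U V : Nat)
    (hU : U = (x % (2:Int) ^ N).toNat ||| (a % (2:Int) ^ N).toNat)
    (hV : V = (a % (2:Int) ^ N).toNat)
    (m : Nat) (hm : m ≤ N) :
    (PySem.List.pyRange 0 (m : Int)).foldl (starBody2 x a) (0, 0) =
      ((((U % 2 ^ m + V % 2 ^ m) / 2 ^ m : Nat) : Int),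
       (((((U % 2 ^ m + V % 2 ^ m) ^^^ (U % 2 ^ m)) ^^^ (V % 2 ^ m)) % 2 ^ m : Nat) : Int)) := by
  induction m with
  | zero => simp [PySem.List.pyRange]
  | succ m ih =>
    have hm' : m ≤ N := by omega
    have hrange : PySem.List.pyRange 0 ((m + 1 : Nat) : Int) =
        PySem.List.pyRange 0 (m : Int) ++ [(m : Int)] := by
      push_cast
      exact PySem.List.pyRange_one_succ_right (by positivity)
    rw [hrange, List.foldl_append, ih hm']
    -- abbreviations
    set XV : Nat := (x % (2:Int) ^ N).toNat with hXV
    set AV : Nat := (a % (2:Int) ^ N).toNat with hAV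
    set up : Nat := U % 2 ^ m with hup
    set vp : Nat := V % 2 ^ m with hvp
    set s : Nat := up + vp with hs
    set C : Nat := s / 2 ^ m with hC
    set r : Nat := s % 2 ^ m with hr
    set CB : Nat := (s ^^^ up ^^^ vp) % 2 ^ m with hCB
    set xb : Nat := XV / 2 ^ m % 2 with hxb
    set vb : Nat := AV / 2 ^ m % 2 with hvb
    set ub : Nat := U / 2 ^ m % 2 with hub
    have hubor : ub = xb ||| vb := by rw [hub, hU, nat_bit_or]
    have hrlt : r < 2 ^ m := Nat.mod_lt _ (by positivity)
    have huplt : up < 2 ^ m := Nat.mod_lt _ (by positivity)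
    have hvplt : vp < 2 ^ m := Nat.mod_lt _ (by positivity)
    have hsC : s = 2 ^ m * C + r := by rw [hC, hr]; exact (Nat.div_add_mod s (2 ^ m)).symm
    have hCle : C ≤ 1 := by
      have h2 : s < 2 * 2 ^ m := by omega
      have := (Nat.div_lt_iff_lt_mul (show 0 < 2 ^ m by positivity)).mpr h2
      omega
    have hxble : xb ≤ 1 := by omega
    have hvble : vb ≤ 1 := by omega
    -- decompositions of U, V mod 2^(m+1)
    have hUsplit : U % 2 ^ (m + 1) = 2 ^ m * ub + up := by
      rw [Nat.pow_succ, Nat.mod_mul, hub, hup]; ring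
    have hVsplit : V % 2 ^ (m + 1) = 2 ^ m * vb + vp := by
      rw [hvb, hvp, hV, Nat.pow_succ, Nat.mod_mul]; ring
    -- the fold step
    have hbit_a : PySem.Int.band (a >>> m) 1 = (vb : Int) := by
      rw [bit_read a m N (by omega), ← hAV, ← hvb]
    have hbit_x : PySem.Int.band (x >>> m) 1 = (xb : Int) := by
      rw [bit_read x m N (by omega), ← hXV, ← hxb]
    have hub1 : ub ≤ 1 := by omega
    have hsum : 2 ^ m * ub + up + (2 ^ m * vb + vp) = 2 ^ m * (ub + vb + C) + r := by
      have h : up + vp = 2 ^ m * C + r := by rw [← hs]; exact hsC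
      calc 2 ^ m * ub + up + (2 ^ m * vb + vp)
          = 2 ^ m * ub + 2 ^ m * vb + (up + vp) := by ring
        _ = 2 ^ m * ub + 2 ^ m * vb + (2 ^ m * C + r) := by rw [h]
        _ = 2 ^ m * (ub + vb + C) + r := by ring
    show starBody2 x a (_, _) _ = _
    rw [starBody2]
    simp only [hbit_a, hbit_x, Int.toNat_natCast]
    -- both components
    clear_value XV AV up vp s C r CB xb vb ub
    simp only [Prod.mk.injEq]
    refine ⟨?_, ?_⟩
    · rw [hUsplit, hVsplit, hsum, nat_div_split _ _ _ hrlt]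
      rw [show ((C : Int)) = ((C : Nat) : Int) from rfl]
      rw [PySem.Int.band_natCast, PySem.Int.bor_natCast]
      congr 1
      rw [hubor]
      rcases (show xb = 0 ∨ xb = 1 by omega) with hx0 | hx0 <;>
        rcases (show vb = 0 ∨ vb = 1 by omega) with hv0 | hv0 <;>
        rcases (show C = 0 ∨ C = 1 by omega) with hc0 | hc0 <;>
        rw [hx0, hv0, hc0] <;> rfl
    · have hCBlt : CB < 2 ^ m := by rw [hCB]; exact Nat.mod_lt _ (by positivity)
      have hlowlt : r ^^^ up < 2 ^ m := Nat.xor_lt_two_pow hrlt huplt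
      have hlowlt2 : (r ^^^ up) ^^^ vp < 2 ^ m := Nat.xor_lt_two_pow hlowlt hvplt
      -- LHS
      have hL : PySem.Int.bor (CB : Int) ((C : Int) <<< m) = ((2 ^ m * C + CB : Nat) : Int) := by
        rw [Int.shiftLeft_eq]
        have hc : ((C : Int)) * 2 ^ m = ((C * 2 ^ m : Nat) : Int) := by push_cast; ring
        rw [hc, PySem.Int.bor_natCast]
        congr 1
        calc CB ||| C * 2 ^ m = (2 ^ m * 0 + CB) ||| (2 ^ m * C + 0) := by ring_nf
          _ = 2 ^ m * (0 ||| C) + (CB ||| 0) := nat_or_split m CB 0 0 C hCBlt (by positivity)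
          _ = 2 ^ m * C + CB := by simp
      rw [hL]
      -- RHS
      have hCBeq : (r ^^^ up) ^^^ vp = CB := by
        have e1 : s ^^^ up = 2 ^ m * C + (r ^^^ up) := by
          calc s ^^^ up = (2 ^ m * C + r) ^^^ (2 ^ m * 0 + up) := by rw [← hsC]; ring_nf
            _ = 2 ^ m * (C ^^^ 0) + (r ^^^ up) := nat_xor_split m r up C 0 hrlt huplt
            _ = 2 ^ m * C + (r ^^^ up) := by simp
        have e2 : (s ^^^ up) ^^^ vp = 2 ^ m * C + ((r ^^^ up) ^^^ vp) := by
          calc (s ^^^ up) ^^^ vp = (2 ^ m * C + (r ^^^ up)) ^^^ (2 ^ m * 0 + vp) := by rw [e1]; ring_nf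
            _ = 2 ^ m * (C ^^^ 0) + ((r ^^^ up) ^^^ vp) := nat_xor_split m (r ^^^ up) vp C 0 hlowlt hvplt
            _ = 2 ^ m * C + ((r ^^^ up) ^^^ vp) := by simp
        rw [hCB, e2, Nat.mul_add_mod, Nat.mod_eq_of_lt hlowlt2]
      have hR : ((U % 2 ^ (m + 1) + V % 2 ^ (m + 1)) ^^^ U % 2 ^ (m + 1) ^^^ V % 2 ^ (m + 1)) % 2 ^ (m + 1)
          = 2 ^ m * C + CB := by
        rw [hUsplit, hVsplit, hsum]
        rw [nat_xor_split m r up (ub + vb + C) ub hrlt huplt]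
        rw [nat_xor_split m (r ^^^ up) vp ((ub + vb + C) ^^^ ub) vb hlowlt hvplt]
        rw [nat_mod_split m _ _ hlowlt2, hCBeq]
        congr 2
        rcases (show ub = 0 ∨ ub = 1 by omega) with h1 | h1 <;>
          rcases (show vb = 0 ∨ vb = 1 by omega) with h2 | h2 <;>
          rcases (show C = 0 ∨ C = 1 by omega) with h3 | h3 <;>
          rw [h1, h2, h3] <;> rfl
      rw [hR]

lemma pyRange_nonpos (n : Int) (hn : n ≤ 0) : PySem.List.pyRange 0 n = [] := by
  simp [PySem.List.pyRange, show ¬(0:Int) < n from by omega]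

-- ===== VERDICT (by name: the statement is the Claim_ definition above) =====
theorem star_carry_spec : Claim_equal_star_carry := by
  unfold Claim_equal_star_carry Spec_star_carry
  intro x a n _
  by_cases hn : n ≤ 0
  · simp [star_carry, star_carry_alt, pyRange_nonpos n hn, hn]
  · push Not at hn
    set N : Nat := n.toNat with hN
    have hnN : ((N : Nat) : Int) = n := Int.toNat_of_nonneg (by omega)
    have hxm0 : (0:Int) ≤ x % (2:Int) ^ N := Int.emod_nonneg _ (by positivity)
    have ham0 : (0:Int) ≤ a % (2:Int) ^ N := Int.emod_nonneg _ (by positivity)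
    set XV : Nat := (x % (2:Int) ^ N).toNat with hXV
    set AV : Nat := (a % (2:Int) ^ N).toNat with hAV
    have hXVlt : XV < 2 ^ N := by
      have h1 : x % (2:Int) ^ N < (2:Int) ^ N := Int.emod_lt_of_pos _ (by positivity)
      have h2 : ((2 ^ N : Nat) : Int) = (2:Int) ^ N := by push_cast; ring
      omega
    have hAVlt : AV < 2 ^ N := by
      have h1 : a % (2:Int) ^ N < (2:Int) ^ N := Int.emod_lt_of_pos _ (by positivity)
      have h2 : ((2 ^ N : Nat) : Int) = (2:Int) ^ N := by push_cast; ring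
      omega
    have hUlt : XV ||| AV < 2 ^ N := Nat.or_lt_two_pow hXVlt hAVlt
    have hA : star_carry x a n =
        (((((XV ||| AV) + AV) ^^^ (XV ||| AV)) ^^^ AV) % 2 ^ N : Nat) := by
      have hinv := carry_inv x a N (XV ||| AV) AV rfl rfl N le_rfl
      rw [Nat.mod_eq_of_lt hUlt, Nat.mod_eq_of_lt hAVlt] at hinv
      simp only [star_carry]
      rw [← hnN, hinv]
    have hmask : ((1 : Int) <<< n.toNat) - 1 = (2:Int) ^ N - 1 := by
      rw [Int.shiftLeft_eq, one_mul, hN]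
    have hBx : PySem.Int.band x ((2:Int) ^ N - 1) = (XV : Int) := by
      rw [band_mask, hXV]; omega
    have hBa : PySem.Int.band a ((2:Int) ^ N - 1) = (AV : Int) := by
      rw [band_mask, hAV]; omega
    have hB : star_carry_alt x a n =
        (((((XV ||| AV) + AV) ^^^ (XV ||| AV)) ^^^ AV) % 2 ^ N : Nat) := by
      rw [star_carry_alt, if_neg (by omega)]
      simp only [hmask, hBx, hBa]
      rw [PySem.Int.bor_natCast]
      have hsum : ((XV ||| AV : Nat) : Int) + (AV : Int) = (((XV ||| AV) + AV : Nat) : Int) := by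
        push_cast; ring
      rw [hsum, PySem.Int.bxor_natCast, PySem.Int.bxor_natCast]
      have hm2 : ((2:Int) ^ N - 1) = ((2 ^ N - 1 : Nat) : Int) := by
        have : (1:Nat) ≤ 2 ^ N := Nat.one_le_two_pow
        push_cast [this]; ring
      rw [hm2, PySem.Int.band_natCast]
      rw [Nat.and_two_pow_sub_one_eq_mod]
    rw [hA, hB]
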